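-- pv_equiv track=rewrite | github.com/symbiotic-engineering/OpenFLASH | package/test/test_basic_region_geometry.py | contiguous_body_map
-- ===== SOURCE A (Python) =====
-- def contiguous_body_map(num_segments: int, num_bodies: int):
--     """
--     Create a body_map that maps contiguous segments to bodies.
--     This guarantees that concatenating segments by body preserves the
--     strictly increasing order of radii when `a` is strictly increasing.
--     """
--     assert 1 <= num_bodies <= num_segments
--     # compute split sizes (distribute segments across bodies)
--     base = num_segments // num_bodies
--     extras = num_segments % num_bodies
--     sizes = [base + (1 if i < extras else 0) for i in range(num_bodies)]
--     bm = []
--     cur = 0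
--     for body_idx, sz in enumerate(sizes):
--         bm.extend([body_idx] * sz)
--         cur += sz
--     return bm
-- ===== SOURCE B (Python) =====
-- def contiguous_body_map(num_segments: int, num_bodies: int):
--     assert 1 <= num_bodies <= num_segments
--     base, extras = divmod(num_segments, num_bodies)
--     t = extras * (base + 1)
--     return [i // (base + 1) if i < t else extras + (i - t) // base
--             for i in range(num_segments)]
-- ===== Notes on version B (the rewrite author's own statement) =====
-- stated objective: alternative
-- what changed: Replaces the 'compute a sizes list then run-length expand with nested extends' structure by a single pass over segment positions computing each body index with a closed-form division formula.
import Mathlib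
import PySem

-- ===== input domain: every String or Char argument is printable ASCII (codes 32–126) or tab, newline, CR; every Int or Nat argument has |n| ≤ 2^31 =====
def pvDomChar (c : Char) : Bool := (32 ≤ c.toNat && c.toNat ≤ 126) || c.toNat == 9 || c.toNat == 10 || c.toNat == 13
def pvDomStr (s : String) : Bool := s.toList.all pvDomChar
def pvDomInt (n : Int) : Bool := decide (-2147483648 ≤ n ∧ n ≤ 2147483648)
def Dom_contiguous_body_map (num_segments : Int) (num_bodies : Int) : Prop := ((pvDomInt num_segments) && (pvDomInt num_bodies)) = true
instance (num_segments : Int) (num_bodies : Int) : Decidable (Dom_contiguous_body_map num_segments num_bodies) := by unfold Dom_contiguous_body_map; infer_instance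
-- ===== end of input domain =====

-- B replaces A's "sizes list then run-length expand" by a single pass computing each
-- body index with a closed-form division formula; same cost, different decomposition.


-- ===== PORT A =====
def contiguous_body_map (num_segments : Int) (num_bodies : Int) : List Int :=
  let base := PySem.Int.floordiv num_segments num_bodies
  let extras := PySem.Int.mod num_segments num_bodies
  let sizes := (PySem.List.pyRange 0 num_bodies 1).map (fun i => base + (if i < extras then 1 else 0))
  -- for body_idx, sz: bm.extend([body_idx]*sz); cur += sz   (state = (bm, cur))
  let st := (PySem.List.enumerate sizes 0).foldl
    (fun (st : List Int × Int) p => (st.1 ++ PySem.List.pyRepeat [p.1] p.2, st.2 + p.2)) ([], 0)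
  st.1

-- ===== PORT B =====
def contiguous_body_map_alt (num_segments : Int) (num_bodies : Int) : List Int :=
  let base := PySem.Int.floordiv num_segments num_bodies
  let extras := PySem.Int.mod num_segments num_bodies
  let t := extras * (base + 1)
  (PySem.List.pyRange 0 num_segments 1).map (fun i =>
    if i < t then PySem.Int.floordiv i (base + 1)
    else extras + PySem.Int.floordiv (i - t) base)

-- ===== PRECONDITION & SPEC =====
-- A's assert raises AssertionError unless 1 <= num_bodies <= num_segments.
def Pre_contiguous_body_map (num_segments : Int) (num_bodies : Int) : Prop :=
  1 ≤ num_bodies ∧ num_bodies ≤ num_segments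
instance (num_segments : Int) (num_bodies : Int) : Decidable (Pre_contiguous_body_map num_segments num_bodies) := by unfold Pre_contiguous_body_map; infer_instance
def pvWitness_contiguous_body_map : Int × Int := (7, 3)

def Spec_contiguous_body_map (num_segments : Int) (num_bodies : Int) (out : List Int) : Prop := out = contiguous_body_map_alt num_segments num_bodies
instance (num_segments : Int) (num_bodies : Int) (out : List Int) : Decidable (Spec_contiguous_body_map num_segments num_bodies out) := by unfold Spec_contiguous_body_map; infer_instance

-- ===== CLAIM (what is proved, stated in full; the proofs are below) =====
def Claim_equal_contiguous_body_map : Prop := ∀ (num_segments : Int) (num_bodies : Int), Dom_contiguous_body_map num_segments num_bodies → Pre_contiguous_body_map num_segments num_bodies → Spec_contiguous_body_map num_segments num_bodies (contiguous_body_map num_segments num_bodies)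

-- ===== LEMMAS AND PROOFS =====

-- canonical form both ports are reduced to: bodies j, j+1, … with the first
-- (extras) bodies of size base+1 and the rest of size base
def pvBody (base : Int) : Int → Int → Nat → List Int
  | _, _, 0 => []
  | extras, j, m+1 =>
      List.replicate (base + (if 0 < extras then 1 else 0)).toNat j ++ pvBody base (extras - 1) (j+1) m

theorem pvBody_nonpos (base : Int) : ∀ (m : Nat) (e e' j : Int), e ≤ 0 → e' ≤ 0 →
    pvBody base e j m = pvBody base e' j m := by
  intro m
  induction m with
  | zero => intro e e' j _ _; rfl
  | succ m ih =>
      intro e e' j he he'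
      simp only [pvBody]
      rw [if_neg (by omega), if_neg (by omega), ih (e-1) (e'-1) (j+1) (by omega) (by omega)]

theorem pvBody_shift (base : Int) : ∀ (m : Nat) (e j : Int),
    pvBody base e j m = (pvBody base e 0 m).map (· + j) := by
  intro m
  induction m with
  | zero => intro e j; rfl
  | succ m ih =>
      intro e j
      simp only [pvBody, List.map_append, List.map_replicate, zero_add]
      rw [ih (e-1) (j+1), ih (e-1) 1, List.map_map]
      congr 1
      apply List.map_congr_left
      intro x _
      simp [Function.comp]
      ring

theorem pv_A_main (base : Int) : ∀ (m : Nat) (a extras : Int) (bm : List Int) (c : Int),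
    (((PySem.List.enumerate ((PySem.List.pyRange a (a + (m:Int)) 1).map
        (fun i => base + (if i < extras then 1 else 0))) a).foldl
      (fun (st : List Int × Int) p => (st.1 ++ PySem.List.pyRepeat [p.1] p.2, st.2 + p.2)) (bm, c)).1)
    = bm ++ pvBody base (extras - a) a m := by
  intro m
  induction m with
  | zero =>
      intro a extras bm c
      rw [PySem.List.pyRange_one_eq_nil (by omega)]
      simp [PySem.List.enumerate_nil, pvBody]
  | succ m ih =>
      intro a extras bm c
      rw [PySem.List.pyRange_one_cons (by push_cast; omega)]
      have hend : a + ((m+1 : Nat) : Int) = (a + 1) + (m : Int) := by push_cast; omega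
      rw [hend]
      simp only [List.map_cons, PySem.List.enumerate_cons, List.foldl_cons]
      rw [ih (a+1) extras _ _]
      simp only [pvBody, PySem.List.pyRepeat_singleton, List.append_assoc]
      congr 2
      · congr 2; by_cases h : a < extras
        · rw [if_pos h, if_pos (by omega)]
        · rw [if_neg h, if_neg (by omega)]
      · congr 1; omega

theorem pv_fdiv_add_self (k b : Int) (hb : 0 < b) :
    PySem.Int.floordiv (b + k) b = PySem.Int.floordiv k b + 1 := by
  rw [PySem.Int.floordiv_eq_ediv_of_pos hb, PySem.Int.floordiv_eq_ediv_of_pos hb]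
  have := Int.add_mul_ediv_right k 1 (by omega : b ≠ 0)
  simp at this
  rw [show b + k = k + b by ring, this]

theorem pv_fdiv_zero_of_lt (i b : Int) (h0 : 0 ≤ i) (h1 : i < b) :
    PySem.Int.floordiv i b = 0 := by
  rw [PySem.Int.floordiv_eq_ediv_of_pos (by omega)]
  exact Int.ediv_eq_zero_of_lt h0 h1

theorem pv_map_const (a b c : Int) (f : Int → Int)
    (h : ∀ i, a ≤ i → i < b → f i = c) :
    (PySem.List.pyRange a b 1).map f = List.replicate (b - a).toNat c := by
  rw [List.eq_replicate_iff]
  constructor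
  · simp [PySem.List.length_pyRange_one]
  · intro x hx
    obtain ⟨i, hi, rfl⟩ := List.mem_map.mp hx
    rw [PySem.List.mem_pyRange_one] at hi
    exact h i hi.1 hi.2

theorem pv_range_shift (a b s : Int) : PySem.List.pyRange (a+s) (b+s) 1 = (PySem.List.pyRange a b 1).map (· + s) := by
  rw [PySem.List.pyRange_one, PySem.List.pyRange_one, List.map_map]
  rw [show b + s - (a + s) = b - a from by ring]
  apply List.map_congr_left
  intro k _
  simp [Function.comp]
  ring

theorem pv_B_main (base : Int) (hb : 1 ≤ base) : ∀ (m : Nat) (extras : Int),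
    0 ≤ extras → extras ≤ (m : Int) →
    (PySem.List.pyRange 0 ((m : Int) * base + extras) 1).map
      (fun i => if i < extras * (base + 1) then PySem.Int.floordiv i (base + 1)
                else extras + PySem.Int.floordiv (i - extras * (base + 1)) base)
    = pvBody base extras 0 m := by
  intro m
  induction m with
  | zero =>
      intro extras h0 h1
      have : extras = 0 := by omega
      subst this
      rw [PySem.List.pyRange_one_eq_nil (by simp)]
      rfl
  | succ m ih =>
      intro extras h0 h1
      have hmb : 0 ≤ (m : Int) * base := mul_nonneg (by positivity) (by omega)
      set s0 : Int := base + (if 0 < extras then 1 else 0) with hs0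
      have hs0pos : 0 < s0 := by rw [hs0]; split_ifs <;> omega
      set e' : Int := extras - (if 0 < extras then 1 else 0) with he'
      have hn : ((m+1 : Nat) : Int) * base + extras = (m : Int) * base + e' + s0 := by
        push_cast; rw [he', hs0]; split_ifs <;> ring
      have he'0 : 0 ≤ e' := by rw [he']; split_ifs <;> omega
      rw [hn, PySem.List.pyRange_one_append 0 s0 ((m : Int) * base + e' + s0)
            (by omega) (by omega), List.map_append]
      -- first chunk: s0 positions of body 0
      have hfirst : (PySem.List.pyRange 0 s0 1).map
          (fun i => if i < extras * (base + 1) then PySem.Int.floordiv i (base + 1)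
                    else extras + PySem.Int.floordiv (i - extras * (base + 1)) base)
          = List.replicate s0.toNat 0 := by
        rw [pv_map_const 0 s0 0 _ ?_]
        · simp
        · intro i hi0 hi1
          by_cases hex : 0 < extras
          · have hts : s0 ≤ extras * (base + 1) := by
              rw [hs0, if_pos hex]
              calc base + 1 = 1 * (base + 1) := by ring
                _ ≤ extras * (base + 1) := by
                    apply mul_le_mul_of_nonneg_right (by omega) (by omega)
            rw [if_pos (by omega)]
            exact pv_fdiv_zero_of_lt i (base+1) hi0 (by rw [hs0, if_pos hex] at hi1; omega)
          · have hex0 : extras = 0 := by omega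
            subst hex0
            rw [if_neg (by omega)]
            simp [pv_fdiv_zero_of_lt i base hi0 (by rw [hs0, if_neg hex] at hi1; omega)]
      rw [hfirst]
      -- second chunk: shift by s0 and use the IH
      have hshift : PySem.List.pyRange s0 ((m : Int) * base + e' + s0) 1
          = (PySem.List.pyRange 0 ((m : Int) * base + e') 1).map (· + s0) := by
        have h := pv_range_shift 0 ((m : Int) * base + e') s0
        rw [zero_add] at h
        exact h
      have hsecond : (PySem.List.pyRange s0 ((m : Int) * base + e' + s0) 1).map
          (fun i => if i < extras * (base + 1) then PySem.Int.floordiv i (base + 1)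
                    else extras + PySem.Int.floordiv (i - extras * (base + 1)) base)
          = ((PySem.List.pyRange 0 ((m : Int) * base + e') 1).map
              (fun i => if i < e' * (base + 1) then PySem.Int.floordiv i (base + 1)
                        else e' + PySem.Int.floordiv (i - e' * (base + 1)) base)).map (· + 1) := by
        rw [hshift, List.map_map, List.map_map]
        apply List.map_congr_left
        intro i hi
        rw [PySem.List.mem_pyRange_one] at hi
        simp only [Function.comp_apply]
        by_cases hex : 0 < extras
        · have hs : s0 = base + 1 := by rw [hs0, if_pos hex]
          have he : e' = extras - 1 := by rw [he', if_pos hex]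
          have ht : extras * (base + 1) = e' * (base + 1) + s0 := by rw [hs, he]; ring
          by_cases hlt : i < e' * (base + 1)
          · rw [if_pos (by omega), if_pos hlt,
                show i + s0 = (base + 1) + i from by rw [hs]; ring,
                pv_fdiv_add_self i (base+1) (by omega)]
          · rw [if_neg (by omega), if_neg hlt,
                show i + s0 - extras * (base + 1) = i - e' * (base + 1) from by rw [ht]; ring,
                he]
            ring
        · have hex0 : extras = 0 := by omega
          have he : e' = 0 := by rw [he', if_neg hex]; omega
          have hs : s0 = base := by rw [hs0, if_neg hex]; omega
          rw [if_neg (by rw [hex0]; omega), if_neg (by rw [he]; omega)]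
          rw [hex0, he, hs]
          simp only [zero_mul, sub_zero, zero_add]
          rw [show i + base = base + i from by ring, pv_fdiv_add_self i base (by omega)]
      rw [hsecond, ih e' he'0 (by omega)]
      have htail : List.map (fun x => x + 1) (pvBody base e' 0 m)
          = pvBody base (extras - 1) (0 + 1) m := by
        rw [show (0:Int) + 1 = 1 from by norm_num, pvBody_shift base m (extras - 1) 1]
        by_cases hex : 0 < extras
        · rw [he', if_pos hex]
        · rw [pvBody_nonpos base m (extras - 1) e' 0 (by omega) (by rw [he', if_neg hex]; omega)]
      show _ = pvBody base extras 0 (m+1)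
      simp only [pvBody]
      rw [← hs0, htail]

-- ===== VERDICT (by name: the statement is the Claim_ definition above) =====
theorem contiguous_body_map_spec : Claim_equal_contiguous_body_map := by
  unfold Claim_equal_contiguous_body_map
  intro n nb _ hpre
  obtain ⟨h1, h2⟩ := hpre
  unfold Spec_contiguous_body_map contiguous_body_map contiguous_body_map_alt
  set base := PySem.Int.floordiv n nb with hbase
  set extras := PySem.Int.mod n nb with hextras
  have hnbpos : 0 < nb := by omega
  have hex0 : 0 ≤ extras := by
    rw [hextras, PySem.Int.mod_eq_emod_of_pos hnbpos]; exact Int.emod_nonneg n (by omega)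
  have hexlt : extras < nb := by
    rw [hextras, PySem.Int.mod_eq_emod_of_pos hnbpos]; exact Int.emod_lt_of_pos n hnbpos
  have hid : base * nb + extras = n := PySem.Int.floordiv_mul_add_mod n nb
  have hb1 : 1 ≤ base := by
    rw [hbase, PySem.Int.le_floordiv_iff_mul_le hnbpos]; omega
  have hm : nb = ((nb.toNat : Nat) : Int) := by omega
  have hA : _ := pv_A_main base nb.toNat 0 extras [] 0
  simp only [zero_add, sub_zero] at hA
  rw [← hm] at hA
  have hn' : n = ((nb.toNat : Nat) : Int) * base + extras := by rw [← hm, mul_comm]; omega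
  have hB := pv_B_main base hb1 nb.toNat extras hex0 (by omega)
  rw [← hn'] at hB
  simp only []
  rw [hA, hB]
  simp
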